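-- pv_equiv track=rewrite | github.com/almirgon/LabP1 | Unidade-6/desempenho.py | melhor_desempenho
-- ===== SOURCE A (Python) =====
-- def melhor_desempenho(l):
-- 	lista = []
-- 	cont = 0
-- 	for i in range(len(l)):
-- 		for e in range(len(l[i])):
-- 			if l[i][e] == '.':
-- 				cont += 1
-- 		lista.append(cont)
-- 		cont = 0
--
-- 	maior = 0
-- 	for x in range(len(lista)):
-- 		if int(lista[x]) >= maior:
-- 			maior = lista[x]
-- 	if maior == 0:
-- 		return -1
-- 	if maior != 0:
-- 		for z in range(len(lista)):
-- 			if int(lista[z]) == maior: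
-- 				return z
-- ===== SOURCE B (Python) =====
-- def melhor_desempenho(l):
--     best_count = 0
--     best_index = -1
--     for i, s in enumerate(l):
--         cnt = s.count('.')
--         if cnt > best_count:
--             best_count = cnt
--             best_index = i
--     return best_index
-- ===== Notes on version B (the rewrite author's own statement) =====
-- stated objective: simpler
-- what changed: Replaced A's three passes (build a per-string dot-count list, fold for the max with >=, rescan for the first index of the max) by one streaming pass keeping best_count/best_index with a strict '>' update and no intermediate list (C-level str.count replaces the char loop); best_index starts at -1 so it already covers the all-zero/empty case.
import Mathlib
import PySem

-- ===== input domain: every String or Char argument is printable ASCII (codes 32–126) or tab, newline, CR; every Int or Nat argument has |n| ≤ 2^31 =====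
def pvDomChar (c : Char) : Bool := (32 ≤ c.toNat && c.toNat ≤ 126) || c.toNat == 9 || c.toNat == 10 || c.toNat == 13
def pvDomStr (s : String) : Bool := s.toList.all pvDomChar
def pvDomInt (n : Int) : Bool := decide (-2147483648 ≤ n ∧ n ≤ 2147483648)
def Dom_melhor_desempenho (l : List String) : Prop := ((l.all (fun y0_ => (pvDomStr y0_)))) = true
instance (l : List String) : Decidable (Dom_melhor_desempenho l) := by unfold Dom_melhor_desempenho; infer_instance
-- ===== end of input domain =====

-- B replaces A's three passes (per-string dot-count list, a >=-fold for the max, a rescan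
-- for its first index) by one streaming pass keeping best_count/best_index (objective: simpler).

-- ===== PORT A =====
-- inner loop: for e in range(len(l[i])): if l[i][e] == '.': cont += 1
def pvDotCount (s : String) : Int :=
  s.toList.foldl (fun cont ch => if ch = '.' then cont + 1 else cont) 0

-- third loop: return first z with lista[z] == maior; Python falls through (None) if absent,
-- which is unreachable since maior ≠ 0 is always an element of lista; -1 stands for that dead path
def pvFindEq : List Int → Int → Int → Int
  | [], _, _ => -1
  | x :: xs, v, z => if x = v then z else pvFindEq xs v (z + 1)

def melhor_desempenho (l : List String) : Int :=
  let lista := l.foldl (fun acc s => acc ++ [pvDotCount s]) []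
  let maior := lista.foldl (fun m x => if x ≥ m then x else m) 0
  if maior = 0 then -1 else pvFindEq lista maior 0

-- ===== PORT B =====
-- single pass: enumerate(l), cnt = s.count('.'), strict '>' update of (best_count, best_index)
def pvLoopB : List String → Int → Int → Int → Int × Int
  | [], bc, bi, _ => (bc, bi)
  | s :: rest, bc, bi, i =>
    let cnt : Int := (PySem.Str.count s "." : Int)
    if cnt > bc then pvLoopB rest cnt i (i + 1) else pvLoopB rest bc bi (i + 1)

def melhor_desempenho_alt (l : List String) : Int :=
  (pvLoopB l 0 (-1) 0).2

-- ===== PRECONDITION & SPEC =====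
def Spec_melhor_desempenho (l : List String) (out : Int) : Prop := out = melhor_desempenho_alt l
instance (l : List String) (out : Int) : Decidable (Spec_melhor_desempenho l out) := by unfold Spec_melhor_desempenho; infer_instance

-- ===== CLAIM (what is proved, stated in full; the proofs are below) =====
def Claim_equal_melhor_desempenho : Prop := ∀ (l : List String), Dom_melhor_desempenho l → Spec_melhor_desempenho l (melhor_desempenho l)

-- ===== LEMMAS AND PROOFS =====

-- s.count('.') counts exactly the '.' characters (pattern of length 1 ⇒ no overlap subtlety)
theorem pvCountGo_dot (fuel : Nat) (cs : List Char) (acc : Nat) (h : cs.length ≤ fuel) :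
    PySem.Chars.count.go ['.'] fuel cs acc = acc + cs.count '.' := by
  induction fuel generalizing cs acc with
  | zero =>
    interval_cases hl : cs.length
    · simp_all [List.length_eq_zero_iff.mp hl, PySem.Chars.count.go]
  | succ n ih =>
    cases cs with
    | nil => simp [PySem.Chars.count.go]
    | cons c t =>
      simp only [PySem.Chars.count.go]
      by_cases hc : c = '.'
      · simp [hc, List.isPrefixOf, ih t (acc + 1) (by simpa using Nat.lt_succ_iff.mp (by simpa using h))]
        omega
      · have : List.isPrefixOf ['.'] (c :: t) = false := by
          simp [List.isPrefixOf]; exact fun hh => (hc hh.symm).elim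
        simp [this, ih t acc (by simpa using Nat.lt_succ_iff.mp (by simpa using h)), hc]

theorem pvDotCount_eq_count (s : String) :
    pvDotCount s = (PySem.Str.count s "." : Int) := by
  have h1 : pvDotCount s = ((s.toList.count '.' : Nat) : Int) := by
    unfold pvDotCount
    have hf := PySem.List.foldl_ite_add_one (p := fun ch => ch = '.') (l := s.toList) (a := (0 : Int))
    rw [hf]
    simp only [List.count_eq_countP, Nat.cast_inj, zero_add]
    exact List.countP_congr (fun a _ => by simp)
  have h2 : PySem.Str.count s "." = s.toList.count '.' := by
    rw [PySem.Str.count_eq]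
    show PySem.Chars.count s.toList ['.'] = _
    unfold PySem.Chars.count
    simp only [List.isEmpty_cons, if_neg Bool.false_ne_true]
    rw [pvCountGo_dot s.toList.length s.toList 0 (le_refl _)]
    simp
  rw [h1, h2]

-- the counts list A builds is the map of dot-counts
theorem pvLista_eq (l : List String) (acc : List Int) :
    l.foldl (fun acc s => acc ++ [pvDotCount s]) acc = acc ++ l.map pvDotCount := by
  induction l generalizing acc with
  | nil => simp
  | cons s rest ih => simp [List.foldl_cons, ih, List.append_assoc]

-- abbreviation for A's max fold (proof-only)
def pvFoldMax (cs : List Int) (m : Int) : Int :=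
  cs.foldl (fun m x => if x ≥ m then x else m) m

theorem pvFoldMax_ge (cs : List Int) (m : Int) : m ≤ pvFoldMax cs m := by
  induction cs generalizing m with
  | nil => simp [pvFoldMax]
  | cons x xs ih =>
    simp only [pvFoldMax, List.foldl_cons]
    by_cases h : x ≥ m
    · simp only [h, if_pos]
      exact le_trans h (ih x)
    · simp only [if_neg h]
      exact ih m

-- core invariant: B's streaming pass computes A's max, and its index equals the first-match scan
theorem pvLoopB_spec (l : List String) (m bi z : Int) :
    pvLoopB l m bi z =
      (pvFoldMax (l.map pvDotCount) m,
       if pvFoldMax (l.map pvDotCount) m = m then bi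
       else pvFindEq (l.map pvDotCount) (pvFoldMax (l.map pvDotCount) m) z) := by
  induction l generalizing m bi z with
  | nil => simp [pvLoopB, pvFoldMax]
  | cons s rest ih =>
    simp only [pvLoopB, List.map_cons]
    rw [← pvDotCount_eq_count]
    set c := pvDotCount s with hc
    by_cases hgt : c > m
    · simp only [if_pos hgt]
      rw [ih c z (z + 1)]
      have hstep : pvFoldMax (c :: rest.map pvDotCount) m = pvFoldMax (rest.map pvDotCount) c := by
        simp [pvFoldMax, List.foldl_cons, if_pos (le_of_lt hgt)]
      rw [hstep]
      have hM := pvFoldMax_ge (rest.map pvDotCount) c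
      have hMm : pvFoldMax (rest.map pvDotCount) c ≠ m := by omega
      simp only [if_neg hMm]
      by_cases he : pvFoldMax (rest.map pvDotCount) c = c
      · simp [pvFindEq, he]
      · simp only [if_neg he, pvFindEq]
        rw [if_neg (fun hh => he hh.symm)]
    · simp only [if_neg hgt]
      rw [ih m bi (z + 1)]
      have hle : c ≤ m := by omega
      have hstep : pvFoldMax (c :: rest.map pvDotCount) m = pvFoldMax (rest.map pvDotCount) m := by
        by_cases he : c = m
        · simp [pvFoldMax, List.foldl_cons, he]
        · simp [pvFoldMax, List.foldl_cons, if_neg (by omega : ¬ c ≥ m)]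
      rw [hstep]
      by_cases heq : pvFoldMax (rest.map pvDotCount) m = m
      · simp [heq]
      · have hM := pvFoldMax_ge (rest.map pvDotCount) m
        have hcM : c ≠ pvFoldMax (rest.map pvDotCount) m := by omega
        simp only [if_neg heq, pvFindEq]
        rw [if_neg (fun hh => hcM hh)]

-- ===== VERDICT (by name: the statement is the Claim_ definition above) =====
theorem melhor_desempenho_spec : Claim_equal_melhor_desempenho := by
  intro l _
  show melhor_desempenho l = melhor_desempenho_alt l
  unfold melhor_desempenho melhor_desempenho_alt
  rw [pvLista_eq, pvLoopB_spec]
  simp [pvFoldMax]
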